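-- pv_equiv track=rewrite | github.com/KyuBKim/EnvironmentScan-system-main-v4 | env-scanning/core/timeline_data_assembler.py | build_steeps_timeline
-- ===== SOURCE A (Python) =====
-- from collections import defaultdict
-- from typing import Any, Dict, List, Optional, Tuple
--
-- def build_steeps_timeline(all_signals_by_wf: Dict[str, List[dict]]) -> Dict[str, Dict[str, int]]:
--     """Compute per-date STEEPs distribution matrix from classified signals.
--
--     Returns:
--         Dict mapping date_str -> {steeps_code: count}. Sorted by date ascending.
--     """
--     timeline: Dict[str, Dict[str, int]] = defaultdict(lambda: defaultdict(int))
--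
--     for wf_label, signals in all_signals_by_wf.items():
--         for sig in signals:
--             date = sig.get("scan_date", "")
--             category = sig.get("category", sig.get("primary_category", ""))
--             if date and category:
--                 timeline[date][category] += 1
--
--     # Sort by date and convert to regular dicts
--     return {k: dict(v) for k, v in sorted(timeline.items())}
-- ===== SOURCE B (Python) =====
-- from collections import Counter
--
--
-- def build_steeps_timeline(all_signals_by_wf):
--     pairs = [
--         (date, cat)
--         for signals in all_signals_by_wf.values()
--         for sig in signals
--         for date in [sig.get("scan_date", "")]
--         for cat in [sig.get("category", sig.get("primary_category", ""))]
--         if date and cat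
--     ]
--     dates = sorted({d for d, _ in pairs})
--     return {d: dict(Counter(c for p, c in pairs if p == d)) for d in dates}
-- ===== Notes on version B (the rewrite author's own statement) =====
-- stated objective: alternative
-- what changed: Instead of incrementally mutating a nested defaultdict and sorting its items at the end, B flattens all signals into one (date, category) pair list, takes the sorted set of dates, and builds each row with a Counter over the categories filtered to that date.
import Mathlib
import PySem

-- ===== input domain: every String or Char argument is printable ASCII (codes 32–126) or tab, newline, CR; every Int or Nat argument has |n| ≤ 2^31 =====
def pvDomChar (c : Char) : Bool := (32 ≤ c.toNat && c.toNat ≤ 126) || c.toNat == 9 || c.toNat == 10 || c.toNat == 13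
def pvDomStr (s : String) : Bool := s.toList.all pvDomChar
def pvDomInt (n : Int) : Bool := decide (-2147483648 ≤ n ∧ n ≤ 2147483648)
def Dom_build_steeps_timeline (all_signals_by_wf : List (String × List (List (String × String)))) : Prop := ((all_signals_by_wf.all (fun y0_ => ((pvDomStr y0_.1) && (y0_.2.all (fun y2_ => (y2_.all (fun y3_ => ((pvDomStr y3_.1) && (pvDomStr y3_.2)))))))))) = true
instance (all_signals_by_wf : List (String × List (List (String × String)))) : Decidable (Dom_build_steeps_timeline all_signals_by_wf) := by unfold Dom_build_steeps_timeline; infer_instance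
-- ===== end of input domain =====

-- B replaces A's incrementally-mutated nested defaultdict with a flattened (date, category)
-- pair list, a sorted set of dates, and one Counter per date (objective: alternative decomposition).


-- ===== PORT A =====
-- A's parameter is a Python dict, represented as an association list; .items() iteration is
-- ported through PySem.Dict.ofList (overwrite-on-duplicate, insertion order), and each
-- signal dict's .get through the same normalization — exact Python dict semantics.
def build_steeps_timeline (all_signals_by_wf : List (String × List (List (String × String)))) : List (String × List (String × Int)) :=
  let timeline : PySem.Dict String (PySem.Dict String Int) :=
    (PySem.Dict.ofList all_signals_by_wf).items.foldl (fun tl wf =>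
      wf.2.foldl (fun tl sig =>
        let sigd := PySem.Dict.ofList sig
        let date := sigd.getD "scan_date" ""
        let category := match sigd.get? "category" with
          | some c => c
          | none => sigd.getD "primary_category" ""
        if date ≠ "" ∧ category ≠ "" then
          tl.modify date PySem.Dict.empty (fun inner => inner.modify category 0 (· + 1))
        else tl) tl) PySem.Dict.empty
  -- sorted(timeline.items()): the dict's keys are distinct, so Python's tuple comparison
  -- never goes beyond the first component — sorting by the key is exact.
  (PySem.List.sorted timeline.items (fun p => p.1) false).map (fun p => (p.1, p.2.items))

-- ===== PORT B =====
def build_steeps_timeline_alt (all_signals_by_wf : List (String × List (List (String × String)))) : List (String × List (String × Int)) :=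
  let pairs : List (String × String) :=
    (PySem.Dict.ofList all_signals_by_wf).values.flatMap (fun signals =>
      signals.filterMap (fun sig =>
        let sd := PySem.Dict.ofList sig
        let date := sd.getD "scan_date" ""
        let cat := match sd.get? "category" with
          | some c => c
          | none => sd.getD "primary_category" ""
        if date ≠ "" ∧ cat ≠ "" then some (date, cat) else none))
  let dates := PySem.List.sorted (PySem.Set.ofList (pairs.map (fun p => p.1))) (fun d => d) false
  dates.map (fun d =>
    (d, (PySem.Dict.counter ((pairs.filter (fun p => p.1 == d)).map (fun p => p.2))).items))

-- ===== PRECONDITION & SPEC =====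
def Spec_build_steeps_timeline (all_signals_by_wf : List (String × List (List (String × String)))) (out : List (String × List (String × Int))) : Prop := out = build_steeps_timeline_alt all_signals_by_wf
instance (all_signals_by_wf : List (String × List (List (String × String)))) (out : List (String × List (String × Int))) : Decidable (Spec_build_steeps_timeline all_signals_by_wf out) := by unfold Spec_build_steeps_timeline; infer_instance

-- ===== CLAIM (what is proved, stated in full; the proofs are below) =====
def Claim_equal_build_steeps_timeline : Prop := ∀ (all_signals_by_wf : List (String × List (List (String × String)))), Dom_build_steeps_timeline all_signals_by_wf → Spec_build_steeps_timeline all_signals_by_wf (build_steeps_timeline all_signals_by_wf)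

-- ===== LEMMAS AND PROOFS =====

-- the (date, category) extraction both programs perform on one signal
def pvPairOf (sig : List (String × String)) : Option (String × String) :=
  let sd := PySem.Dict.ofList sig
  let date := sd.getD "scan_date" ""
  let cat := match sd.get? "category" with
    | some c => c
    | none => sd.getD "primary_category" ""
  if date ≠ "" ∧ cat ≠ "" then some (date, cat) else none

def pvStep (tl : PySem.Dict String (PySem.Dict String Int)) (p : String × String) :
    PySem.Dict String (PySem.Dict String Int) :=
  tl.modify p.1 PySem.Dict.empty (fun inner => inner.modify p.2 0 (· + 1))

def pvPairs (l : List (String × List (List (String × String)))) : List (String × String) :=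
  (PySem.Dict.ofList l).values.flatMap (fun signals => signals.filterMap pvPairOf)

def pvCats (P : List (String × String)) (d : String) : List String :=
  (P.filter (fun p => p.1 == d)).map (fun p => p.2)

lemma pvB_eq (l : List (String × List (List (String × String)))) :
    build_steeps_timeline_alt l
    = (PySem.List.sorted (PySem.Set.ofList ((pvPairs l).map (fun p => p.1))) (fun d => d) false).map
        (fun d => (d, (PySem.Dict.counter (pvCats (pvPairs l) d)).items)) := rfl

lemma pvA_fold (l : List (String × List (List (String × String)))) :
    (PySem.Dict.ofList l).items.foldl (fun tl wf =>
      wf.2.foldl (fun tl sig =>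
        let sigd := PySem.Dict.ofList sig
        let date := sigd.getD "scan_date" ""
        let category := match sigd.get? "category" with
          | some c => c
          | none => sigd.getD "primary_category" ""
        if date ≠ "" ∧ category ≠ "" then
          tl.modify date PySem.Dict.empty (fun inner => inner.modify category 0 (· + 1))
        else tl) tl) PySem.Dict.empty
    = (pvPairs l).foldl pvStep PySem.Dict.empty := by
  rw [pvPairs, List.foldl_flatMap]
  have hv : (PySem.Dict.ofList l).values = (PySem.Dict.ofList l).items.map (fun p => p.2) := rfl
  rw [hv, List.foldl_map]
  congr 1
  funext tl wf
  rw [List.foldl_filterMap]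
  congr 1
  funext a sig
  simp only [pvPairOf, pvStep]
  by_cases hcond : (PySem.Dict.ofList sig).getD "scan_date" "" ≠ "" ∧
      (match (PySem.Dict.ofList sig).get? "category" with
        | some c => c
        | none => (PySem.Dict.ofList sig).getD "primary_category" "") ≠ ""
  · rw [if_pos hcond, if_pos hcond]
  · rw [if_neg hcond, if_neg hcond]

lemma pvGetD (P : List (String × String)) (t : PySem.Dict String (PySem.Dict String Int)) (d : String) :
    (P.foldl pvStep t).getD d PySem.Dict.empty
    = (pvCats P d).foldl (fun inner c => inner.modify c 0 (· + 1)) (t.getD d PySem.Dict.empty) := by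
  induction P generalizing t with
  | nil => simp [pvCats]
  | cons a P ih =>
    simp only [List.foldl_cons, pvCats, List.filter_cons]
    by_cases h : a.1 = d
    · simp only [ih, pvCats, pvStep, h, beq_self_eq_true, if_true, List.map_cons, List.foldl_cons,
        PySem.Dict.getD_modify]
    · have hb : (a.1 == d) = false := by simp [h]
      have hne : ¬ d = a.1 := fun hh => h (Eq.symm hh)
      simp only [ih, pvCats, pvStep, hb, Bool.false_eq_true, if_false,
        PySem.Dict.getD_modify, if_neg hne]

lemma pvKeys (P : List (String × String)) :
    (P.foldl pvStep PySem.Dict.empty).keys = PySem.Set.ofList (P.map (fun p => p.1)) := by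
  unfold pvStep
  have h := PySem.Dict.keys_foldl_modify_key (ν := PySem.Dict String Int) P (fun p => p.1) PySem.Dict.empty
    (fun _ p => fun inner => inner.modify p.2 0 (· + 1)) PySem.Dict.empty
  simpa [PySem.Dict.keys_empty, PySem.Set.update_nil_left] using h

lemma pvMain (l : List (String × List (List (String × String)))) :
    build_steeps_timeline l = build_steeps_timeline_alt l := by
  have hA : build_steeps_timeline l
      = (PySem.List.sorted ((pvPairs l).foldl pvStep PySem.Dict.empty).items (fun p => p.1) false).map
          (fun p => (p.1, p.2.items)) := by
    rw [build_steeps_timeline, pvA_fold]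
  set P := pvPairs l with hP
  set T := P.foldl pvStep PySem.Dict.empty with hT
  have hnd : T.keys.Nodup := by rw [hT, pvKeys]; exact PySem.Set.nodup_ofList _
  have hitems : T.items
      = (PySem.Set.ofList (P.map (fun p => p.1))).map
          (fun k => (k, PySem.Dict.counter (pvCats P k))) := by
    rw [PySem.Dict.items_eq_map_keys T hnd PySem.Dict.empty, hT, pvKeys]
    refine List.map_congr_left (fun k _ => ?_)
    rw [← hT, pvGetD, PySem.Dict.getD_empty, PySem.Dict.counter_eq_foldl]
  have hsort : PySem.List.sorted T.items (fun p => p.1) false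
      = (PySem.List.sorted (PySem.Set.ofList (P.map (fun p => p.1))) (fun d => d) false).map
          (fun k => (k, PySem.Dict.counter (pvCats P k))) := by
    rw [hitems]
    apply PySem.List.sorted_eq_of_perm_of_pairwise_lt
    · exact (PySem.List.sorted_perm _ _ _).map _
    · rw [List.pairwise_map]
      have hle := PySem.List.sorted_pairwise (PySem.Set.ofList (P.map (fun p => p.1))) (fun d => d)
      have hnd2 : (PySem.List.sorted (PySem.Set.ofList (P.map (fun p => p.1))) (fun d => d) false).Nodup :=
        (PySem.List.sorted_perm _ _ _).symm.nodup (PySem.Set.nodup_ofList _)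
      exact (hle.and hnd2).imp (fun h => lt_of_le_of_ne h.1 h.2)
  rw [hA, hsort, pvB_eq, List.map_map]
  rfl

-- ===== VERDICT (by name: the statement is the Claim_ definition above) =====
theorem build_steeps_timeline_spec : Claim_equal_build_steeps_timeline := by
  intro l _
  unfold Spec_build_steeps_timeline
  exact pvMain l
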